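-- pv_equiv track=rewrite | github.com/kumsssss/get-artifacts | sort-json-file.py | comparator_by_key
-- ===== SOURCE A (Python) =====
-- def comparator_by_key(a,b, attr):
--     if attr in a and attr not in b:
--         return -1
--     elif attr in b and attr not in a:
--         return 1
--     elif attr in a and attr in b:
--         if a[attr] < b[attr]:
--             return -1
--         elif a[attr] > b[attr]:
--             return 1
--
--     if attr == 'deploymentTarget':
--         return comparator_by_key(a, b, 'artifactType')
--     elif attr == 'artifactType':
--         return comparator_by_key(a, b, 'applicationType')
--     else:
--         return 0
-- ===== SOURCE B (Python) =====
-- def _cmp_at(a, b, k):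
--     if (k in a) != (k in b):
--         return -1 if k in a else 1
--     if k in a and k in b:
--         if a[k] < b[k]:
--             return -1
--         if a[k] > b[k]:
--             return 1
--     return 0
--
--
-- def comparator_by_key(a, b, attr):
--     chain = ['deploymentTarget', 'artifactType', 'applicationType']
--     keys = chain[chain.index(attr):] if attr in chain else [attr]
--     for k in keys:
--         c = _cmp_at(a, b, k)
--         if c != 0:
--             return c
--     return 0
-- ===== Notes on version B (the rewrite author's own statement) =====
-- stated objective: simpler
-- what changed: Replaces A's tail-recursive fallback chain with an explicit loop over the suffix of the fixed key chain starting at attr, using a small three-way compare helper per key.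
import Mathlib
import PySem

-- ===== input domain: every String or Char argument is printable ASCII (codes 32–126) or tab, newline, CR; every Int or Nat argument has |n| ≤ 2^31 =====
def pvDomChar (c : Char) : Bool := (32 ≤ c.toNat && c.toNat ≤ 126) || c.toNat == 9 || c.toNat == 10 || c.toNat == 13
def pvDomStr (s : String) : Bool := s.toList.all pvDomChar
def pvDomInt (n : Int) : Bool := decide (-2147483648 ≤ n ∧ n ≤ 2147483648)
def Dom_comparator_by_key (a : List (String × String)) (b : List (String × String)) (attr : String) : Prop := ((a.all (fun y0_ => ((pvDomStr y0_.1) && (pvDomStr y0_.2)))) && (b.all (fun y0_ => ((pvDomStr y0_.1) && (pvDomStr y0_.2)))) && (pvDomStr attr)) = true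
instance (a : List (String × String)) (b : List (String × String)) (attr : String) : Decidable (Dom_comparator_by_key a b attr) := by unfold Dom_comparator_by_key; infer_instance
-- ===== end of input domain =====

-- B replaces A's tail-recursive fallback chain with an explicit loop over the key-chain suffix (objective: simpler).


-- ===== PORT A =====
-- recursion on attr: the fallback chain deploymentTarget → artifactType → applicationType strictly decreases this rank
def pvRankA (attr : String) : Nat :=
  if attr = "deploymentTarget" then 2 else if attr = "artifactType" then 1 else 0

def comparator_by_key (a : List (String × String)) (b : List (String × String)) (attr : String) : Int :=
  if (a.lookup attr).isSome && !(b.lookup attr).isSome then -1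
  else if (b.lookup attr).isSome && !(a.lookup attr).isSome then 1
  else if (a.lookup attr).isSome && (b.lookup attr).isSome &&
          decide ((a.lookup attr).getD "" < (b.lookup attr).getD "") then -1
  else if (a.lookup attr).isSome && (b.lookup attr).isSome &&
          decide ((b.lookup attr).getD "" < (a.lookup attr).getD "") then 1
  else if attr = "deploymentTarget" then comparator_by_key a b "artifactType"
  else if attr = "artifactType" then comparator_by_key a b "applicationType"
  else 0
termination_by pvRankA attr
decreasing_by all_goals simp_all [pvRankA]

-- ===== PORT B =====
def pvCmpAt (a : List (String × String)) (b : List (String × String)) (k : String) : Int :=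
  if (a.lookup k).isSome ≠ (b.lookup k).isSome then
    (if (a.lookup k).isSome then -1 else 1)
  else if (a.lookup k).isSome && (b.lookup k).isSome then
    (if (a.lookup k).getD "" < (b.lookup k).getD "" then -1
     else if (b.lookup k).getD "" < (a.lookup k).getD "" then 1
     else 0)
  else 0

def pvScan (a : List (String × String)) (b : List (String × String)) : List String → Int
  | [] => 0
  | k :: rest => let c := pvCmpAt a b k; if c ≠ 0 then c else pvScan a b rest

def comparator_by_key_alt (a : List (String × String)) (b : List (String × String)) (attr : String) : Int :=
  let chain : List String := ["deploymentTarget", "artifactType", "applicationType"]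
  let keys : List String :=
    match PySem.List.index? chain attr with
    | some i => PySem.List.slice chain (some i) none
    | none => [attr]
  pvScan a b keys

-- ===== PRECONDITION & SPEC =====
def Spec_comparator_by_key (a : List (String × String)) (b : List (String × String)) (attr : String) (out : Int) : Prop := out = comparator_by_key_alt a b attr
instance (a : List (String × String)) (b : List (String × String)) (attr : String) (out : Int) : Decidable (Spec_comparator_by_key a b attr out) := by unfold Spec_comparator_by_key; infer_instance

-- ===== CLAIM (what is proved, stated in full; the proofs are below) =====
def Claim_equal_comparator_by_key : Prop := ∀ (a : List (String × String)) (b : List (String × String)) (attr : String), Dom_comparator_by_key a b attr → Spec_comparator_by_key a b attr (comparator_by_key a b attr)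

-- ===== LEMMAS AND PROOFS =====

-- one unfolding of A equals "try this key, else fall through"
lemma comparator_head (a b : List (String × String)) (attr : String) :
    comparator_by_key a b attr =
      (if pvCmpAt a b attr ≠ 0 then pvCmpAt a b attr
       else if attr = "deploymentTarget" then comparator_by_key a b "artifactType"
       else if attr = "artifactType" then comparator_by_key a b "applicationType"
       else 0) := by
  rw [comparator_by_key]
  unfold pvCmpAt
  rcases ha : (a.lookup attr) with _ | x <;> rcases hb : (b.lookup attr) with _ | y <;>
    simp <;> split_ifs <;> simp_all

lemma comparator_generic (a b : List (String × String)) (attr : String)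
    (h1 : attr ≠ "deploymentTarget") (h2 : attr ≠ "artifactType") :
    comparator_by_key a b attr = pvScan a b [attr] := by
  rw [comparator_head, pvScan]
  simp only [h1, h2, if_false]
  by_cases h : pvCmpAt a b attr = 0 <;> simp [h, pvScan]

lemma comparator_app (a b : List (String × String)) :
    comparator_by_key a b "applicationType" = pvScan a b ["applicationType"] :=
  comparator_generic a b _ (by decide) (by decide)

lemma comparator_art (a b : List (String × String)) :
    comparator_by_key a b "artifactType" = pvScan a b ["artifactType", "applicationType"] := by
  rw [comparator_head, pvScan]
  by_cases h : pvCmpAt a b "artifactType" = 0 <;>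
    simp [h, comparator_app a b]

lemma comparator_dep (a b : List (String × String)) :
    comparator_by_key a b "deploymentTarget" =
      pvScan a b ["deploymentTarget", "artifactType", "applicationType"] := by
  rw [comparator_head, pvScan]
  by_cases h : pvCmpAt a b "deploymentTarget" = 0 <;>
    simp [h, comparator_art a b]

lemma index?_chain_of_ne (attr : String)
    (h1 : attr ≠ "deploymentTarget") (h2 : attr ≠ "artifactType") (h3 : attr ≠ "applicationType") :
    PySem.List.index? ["deploymentTarget", "artifactType", "applicationType"] attr = none := by
  simp [PySem.List.index?_eq_idxOf?, List.idxOf?, List.findIdx?, List.findIdx?.go,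
        Ne.symm h1, Ne.symm h2, Ne.symm h3]

-- ===== VERDICT (by name: the statement is the Claim_ definition above) =====
theorem comparator_by_key_spec : Claim_equal_comparator_by_key := by
  intro a b attr _
  unfold Spec_comparator_by_key comparator_by_key_alt
  by_cases h1 : attr = "deploymentTarget"
  · subst h1; simpa using comparator_dep a b
  by_cases h2 : attr = "artifactType"
  · subst h2; simpa using comparator_art a b
  by_cases h3 : attr = "applicationType"
  · subst h3; simpa using comparator_app a b
  · simp only [index?_chain_of_ne attr h1 h2 h3]
    exact comparator_generic a b attr h1 h2
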